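-- pv_equiv track=rewrite | github.com/AlbertWeichselbraun/cronitor | src/cronitor/monitor/amazon_kindle_quotes.py | get_quote
-- ===== SOURCE A (Python) =====
-- def get_quote(text):
--     """
--     Extract the quote from the given text.
--
--     Note:
--         The Kindle puts the quote text under quotation marks.
--     """
--     result = []
--     in_quote = False
--     for line in text.split('\n'):
--         if line.startswith('"'):
--             in_quote = True
--         elif in_quote and not line.strip():
--             in_quote = False
--
--         if in_quote:
--             result.append(line.strip())
--
--     return ' '.join(result)
-- ===== SOURCE B (Python) =====
-- def _quote_part(para):
--     """Return the stripped lines of `para` from the first line that opens a quote on."""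
--     for i, line in enumerate(para):
--         if line.startswith('"'):
--             return [l.strip() for l in para[i:]]
--     return []
--
--
-- def get_quote(text):
--     """
--     Extract the quote from the given text.
--
--     Note:
--         The Kindle puts the quote text under quotation marks.
--     """
--     paragraphs = []
--     current = []
--     for line in text.split('\n'):
--         if line.strip():
--             current.append(line)
--         else:
--             paragraphs.append(current)
--             current = []
--     paragraphs.append(current)
--
--     result = []
--     for para in paragraphs:
--         result.extend(_quote_part(para))
--     return ' '.join(result)
-- ===== Notes on version B (the rewrite author's own statement) =====
-- stated objective: alternative
-- what changed: A's single pass with a running in_quote flag is replaced by grouping the lines into blank-line-delimited paragraphs and, per paragraph, locating the first line that opens a quotation mark and taking the stripped suffix from there.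
import Mathlib
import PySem

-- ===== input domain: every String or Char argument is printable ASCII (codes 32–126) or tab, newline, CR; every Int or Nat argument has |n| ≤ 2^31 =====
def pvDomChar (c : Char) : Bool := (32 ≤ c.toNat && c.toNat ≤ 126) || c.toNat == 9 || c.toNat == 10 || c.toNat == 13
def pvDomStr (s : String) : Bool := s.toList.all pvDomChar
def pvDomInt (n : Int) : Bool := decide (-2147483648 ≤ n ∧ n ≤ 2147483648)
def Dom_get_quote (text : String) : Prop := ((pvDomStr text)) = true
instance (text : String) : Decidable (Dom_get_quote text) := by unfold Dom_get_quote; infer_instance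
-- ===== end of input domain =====

-- B replaces A's running in_quote flag with an explicit group-into-paragraphs /
-- locate-quote-start / take-suffix decomposition (objective: alternative, same cost).

-- ===== PORT A =====
-- one loop step of A: update in_quote, then append the stripped line if in_quote
def pvStepA (st : List String × Bool) (line : String) : List String × Bool :=
  let in_quote :=
    if PySem.Str.startswith line "\"" then true
    else if st.2 && decide (PySem.Str.strip line = "") then false
    else st.2
  (if in_quote then st.1 ++ [PySem.Str.strip line] else st.1, in_quote)

def get_quote (text : String) : String :=
  let lines := (PySem.Str.split? text "\n").getD []
  let st := lines.foldl pvStepA ([], false)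
  PySem.Str.join " " st.1

-- ===== PORT B =====
-- B's paragraph-grouping loop step: non-blank lines extend the current paragraph,
-- blank (whitespace-only) lines close it
def pvParasStep (st : List (List String) × List String) (line : String) :
    List (List String) × List String :=
  if decide (PySem.Str.strip line = "") = false then (st.1, st.2 ++ [line])
  else (st.1 ++ [st.2], [])

def pvParagraphs (lines : List String) : List (List String) :=
  let st := lines.foldl pvParasStep ([], [])
  st.1 ++ [st.2]

-- B's _quote_part: first index whose line literally starts with '"', then the
-- stripped suffix from there (enumerate + para[i:] in Source B)
def pvQuotePart (para : List String) : List String :=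
  match para.findIdx? (fun l => PySem.Str.startswith l "\"") with
  | some i => (para.drop i).map PySem.Str.strip
  | none => []

def get_quote_alt (text : String) : String :=
  let lines := (PySem.Str.split? text "\n").getD []
  PySem.Str.join " " ((pvParagraphs lines).foldl (fun r p => r ++ pvQuotePart p) [])

-- ===== PRECONDITION & SPEC =====
def Spec_get_quote (text : String) (out : String) : Prop := out = get_quote_alt text
instance (text : String) (out : String) : Decidable (Spec_get_quote text out) := by
  unfold Spec_get_quote; infer_instance

-- ===== CLAIM (what is proved, stated in full; the proofs are below) =====
def Claim_equal_get_quote : Prop := ∀ (text : String), Dom_get_quote text → Spec_get_quote text (get_quote text)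

-- ===== LEMMAS AND PROOFS =====

-- proof-side recursive form of B's paragraph grouping
def pvParasRec (cur : List String) : List String → List (List String)
  | [] => [cur]
  | l :: ls =>
      if PySem.Str.strip l = "" then cur :: pvParasRec [] ls
      else pvParasRec (cur ++ [l]) ls

-- whether some line of the current paragraph has opened a quote
def pvAnyQ (cur : List String) : Bool := cur.any (fun l => PySem.Str.startswith l "\"")

theorem pvQuotePart_eq (l : List String) :
    pvQuotePart l
      = (l.dropWhile (fun s => !PySem.Str.startswith s "\"")).map PySem.Str.strip := by
  induction l with
  | nil => rfl
  | cons x xs ih =>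
    simp only [pvQuotePart, List.findIdx?_cons, List.dropWhile_cons] at ih ⊢
    cases h : PySem.Str.startswith x "\"" with
    | true => simp
    | false =>
      simp only [Bool.not_false, if_true, Bool.false_eq_true, if_false]
      rw [← ih]
      cases hf : List.findIdx? (fun l => PySem.Str.startswith l "\"") xs with
      | none => simp
      | some i => simp

-- a line that opens a quote is not whitespace-only
theorem pv_strip_ne_empty_of_quote (l : String)
    (h : PySem.Str.startswith l "\"" = true) : PySem.Str.strip l ≠ "" := by
  intro hc
  rw [PySem.Str.startswith_eq, PySem.Chars.startswith_iff] at h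
  obtain ⟨t, ht⟩ := h
  have hc' : PySem.Chars.strip l.toList = [] := by
    have := congrArg String.toList hc
    simpa [PySem.Str.toList_strip] using this
  have hq : ("\"" : String).toList = ['"'] := by decide
  rw [hq] at ht
  rw [← ht] at hc'
  have hsp : PySem.Chars.isspace '"' = false := by decide
  rw [show (['"'] ++ t) = '"' :: t from rfl] at hc'
  have hl : PySem.Chars.lstrip ('"' :: t) = '"' :: t := by
    simp [PySem.Chars.lstrip, hsp]
  rw [PySem.Chars.strip, hl, PySem.Chars.rstrip] at hc'
  rw [List.reverse_cons, List.dropWhile_append] at hc'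
  by_cases he : (List.dropWhile PySem.Chars.isspace t.reverse).isEmpty = true
  · simp [he, hsp] at hc'
  · simp [he] at hc'

theorem pvQuotePart_nil_of_none (cur : List String) (ha : pvAnyQ cur = false) :
    pvQuotePart cur = [] := by
  rw [pvQuotePart_eq]
  have : List.dropWhile (fun s => !PySem.Str.startswith s "\"") cur = [] := by
    rw [List.dropWhile_eq_nil_iff]
    intro x hx
    simp only [pvAnyQ, List.any_eq_false] at ha
    simpa using ha x hx
  rw [this]; rfl

theorem pvQuotePart_append (cur : List String) (l : String) :
    pvQuotePart (cur ++ [l])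
      = pvQuotePart cur
        ++ (if PySem.Str.startswith l "\"" || pvAnyQ cur then [PySem.Str.strip l] else []) := by
  rw [pvQuotePart_eq, pvQuotePart_eq, List.dropWhile_append]
  cases ha : pvAnyQ cur with
  | true =>
    have hne : (List.dropWhile (fun s => !PySem.Str.startswith s "\"") cur).isEmpty = false := by
      rw [List.isEmpty_eq_false_iff, Ne, List.dropWhile_eq_nil_iff]
      intro hall
      simp only [pvAnyQ, List.any_eq_true] at ha
      obtain ⟨x, hx, hxs⟩ := ha
      have := hall x hx
      rw [hxs] at this
      simp at this
    rw [hne]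
    simp
  | false =>
    have hnil : List.dropWhile (fun s => !PySem.Str.startswith s "\"") cur = [] := by
      rw [List.dropWhile_eq_nil_iff]
      intro x hx
      simp only [pvAnyQ, List.any_eq_false] at ha
      simpa using ha x hx
    rw [hnil]
    simp only [List.isEmpty_nil, if_true, List.dropWhile_cons, List.map_nil, List.nil_append,
      Bool.or_false]
    cases hs : PySem.Str.startswith l "\"" <;> simp [List.dropWhile_nil]

theorem pvParasFold (ls : List String) :
    ∀ (paras : List (List String)) (cur : List String),
      (ls.foldl pvParasStep (paras, cur)).1 ++ [(ls.foldl pvParasStep (paras, cur)).2]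
        = paras ++ pvParasRec cur ls := by
  induction ls with
  | nil => intro paras cur; simp [pvParasRec]
  | cons l ls ih =>
    intro paras cur
    by_cases h : PySem.Str.strip l = ""
    · simp only [List.foldl_cons, pvParasStep, h, decide_true, pvParasRec]
      simpa using ih (paras ++ [cur]) []
    · simp only [List.foldl_cons, pvParasStep, decide_eq_false h, pvParasRec, if_neg h]
      exact ih paras (cur ++ [l])

theorem pvMain (ls : List String) :
    ∀ (cur res : List String),
      (ls.foldl pvStepA (res ++ pvQuotePart cur, pvAnyQ cur)).1
        = res ++ (pvParasRec cur ls).flatMap pvQuotePart := by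
  induction ls with
  | nil => intro cur res; simp [pvParasRec]
  | cons l ls ih =>
    intro cur res
    by_cases hb : PySem.Str.strip l = ""
    · -- blank line: paragraph break, nothing appended
      have hst : PySem.Str.startswith l "\"" = false := by
        cases h : PySem.Str.startswith l "\"" with
        | true => exact absurd hb (pv_strip_ne_empty_of_quote l h)
        | false => rfl
      have hstep : pvStepA (res ++ pvQuotePart cur, pvAnyQ cur) l
          = (res ++ pvQuotePart cur, false) := by
        simp only [pvStepA, hst, if_false, hb, decide_true, Bool.and_true, Bool.false_eq_true]
        cases pvAnyQ cur <;> simp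
      rw [List.foldl_cons, hstep]
      have h2 := ih [] (res ++ pvQuotePart cur)
      rw [pvQuotePart_nil_of_none [] rfl, List.append_nil] at h2
      have hAnil : pvAnyQ ([] : List String) = false := rfl
      rw [hAnil] at h2
      rw [h2]
      simp only [pvParasRec, if_pos hb, List.flatMap_cons, List.append_assoc]
    · -- non-blank line: it joins the current paragraph
      have hstep : pvStepA (res ++ pvQuotePart cur, pvAnyQ cur) l
          = (res ++ pvQuotePart (cur ++ [l]), pvAnyQ (cur ++ [l])) := by
        have hA : pvAnyQ (cur ++ [l]) = (pvAnyQ cur || PySem.Str.startswith l "\"") := by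
          simp [pvAnyQ, List.any_append]
        rw [pvQuotePart_append cur l, hA]
        cases hs : PySem.Str.startswith l "\"" with
        | true =>
          have hs2 : PySem.Chars.startswith l.toList ['"'] = true := by simpa using hs
          simp [pvStepA, hs2]
        | false =>
          simp only [pvStepA, hs, if_false, decide_eq_false hb, Bool.and_false,
            Bool.false_eq_true, Bool.false_or, Bool.or_false]
          cases hac : pvAnyQ cur <;> simp
      rw [List.foldl_cons, hstep, ih (cur ++ [l]) res]
      simp only [pvParasRec, if_neg hb]

-- ===== VERDICT (by name: the statement is the Claim_ definition above) =====
theorem get_quote_spec : Claim_equal_get_quote := by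
  intro text _
  unfold Spec_get_quote
  show PySem.Str.join " " (List.foldl pvStepA ([], false) ((PySem.Str.split? text "\n").getD [])).1
      = PySem.Str.join " "
          (List.foldl (fun r p => r ++ pvQuotePart p) []
            (pvParagraphs ((PySem.Str.split? text "\n").getD [])))
  have h0 : (List.foldl pvStepA ([], false) ((PySem.Str.split? text "\n").getD [])).1
      = List.flatMap pvQuotePart (pvParasRec [] ((PySem.Str.split? text "\n").getD [])) := by
    simpa [pvQuotePart, pvAnyQ] using pvMain ((PySem.Str.split? text "\n").getD []) [] []
  have h2 : pvParagraphs ((PySem.Str.split? text "\n").getD [])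
      = pvParasRec [] ((PySem.Str.split? text "\n").getD []) := by
    simpa [pvParagraphs] using pvParasFold ((PySem.Str.split? text "\n").getD []) [] []
  rw [h0, h2, PySem.List.foldl_append_eq_flatMap, List.nil_append]
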